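-- pv_equiv track=rewrite | github.com/raphaelvrosa/mutlicriteria-slicing | main/slicing.py | decompose_node_service_maps
-- ===== SOURCE A (Python) =====
-- import itertools
--
-- def decompose_node_service_maps(node_service_map):
--     map_decomposed = []
--     node_maps = {}
--     node_id = 0
--     for (node, req_node) in node_service_map:
--         node_maps[node_id] = []
--         for _, properties in req_node.items():
--              node_maps[node_id].append( (node,properties) )
--         node_id += 1
--
--     node_maps_lists =  node_maps.values()
--
--     # if len(node_maps) > 1:
--     map_decomposed = list(itertools.product(*node_maps_lists))
--     # else:
--     #     map_decomposed = node_maps_lists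
--     return map_decomposed
-- ===== SOURCE B (Python) =====
-- def decompose_node_service_maps(node_service_map):
--     # Mixed-radix (odometer) enumeration: every combination is indexed by one
--     # integer in range(total) and its digits are decoded per node, instead of
--     # building the product by repeated list expansion (itertools.product).
--     rows = []
--     for node, req_node in node_service_map:
--         rows.append([(node, properties) for properties in req_node.values()])
--     total = 1
--     for row in rows:
--         total *= len(row)
--     result = []
--     for index in range(total):
--         combo = []
--         i = index
--         for row in reversed(rows):
--             combo.append(row[i % len(row)])
--             i //= len(row)
--         combo.reverse()
--         result.append(tuple(combo))
--     return result
-- ===== Notes on version B (the rewrite author's own statement) =====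
-- stated objective: alternative
-- what changed: Replaces the dict-of-per-node-lists + itertools.product construction with mixed-radix (odometer) enumeration: each combination is addressed by a single integer index in range(total) whose digits (mod/floordiv by each row length, rightmost fastest) select one (node, properties) pair per node.
import Mathlib
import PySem

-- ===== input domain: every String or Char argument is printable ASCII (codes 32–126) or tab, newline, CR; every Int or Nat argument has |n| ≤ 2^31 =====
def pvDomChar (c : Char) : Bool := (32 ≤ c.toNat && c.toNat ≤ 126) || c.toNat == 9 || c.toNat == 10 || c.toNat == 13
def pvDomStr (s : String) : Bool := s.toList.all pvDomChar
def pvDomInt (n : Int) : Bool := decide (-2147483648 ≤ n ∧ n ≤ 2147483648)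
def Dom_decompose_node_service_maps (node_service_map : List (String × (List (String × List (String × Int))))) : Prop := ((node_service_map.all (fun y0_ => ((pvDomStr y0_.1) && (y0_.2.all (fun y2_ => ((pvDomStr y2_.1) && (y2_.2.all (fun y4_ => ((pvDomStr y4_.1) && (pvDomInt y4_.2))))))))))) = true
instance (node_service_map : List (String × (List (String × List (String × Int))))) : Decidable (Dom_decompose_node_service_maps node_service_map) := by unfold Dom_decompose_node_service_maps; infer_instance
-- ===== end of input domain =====

-- B replaces the dict-of-per-node-lists + itertools.product build by mixed-radix
-- (odometer) enumeration: one integer index per combination, decoded digit by digit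
-- (alternative algorithm, same asymptotic cost).

-- ===== PORT A =====
-- itertools.product(*lists): rightmost factor varies fastest (the library call, ported as a function)
def pyProduct {α : Type} (lists : List (List α)) : List (List α) :=
  lists.foldr (fun l acc => l.flatMap (fun x => acc.map (fun t => x :: t))) [[]]

def decompose_node_service_maps (node_service_map : List (String × (List (String × List (String × Int))))) : List (List (String × (List (String × Int)))) :=
  -- node_maps = {}; node_id = 0; for (node, req_node) in node_service_map: …
  -- map_decomposed = list(itertools.product(*node_maps.values()))
  pyProduct
  ((node_service_map.foldl
    (fun (st : PySem.Dict Int (List (String × (List (String × Int)))) × Int) nr =>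
      -- node_maps[node_id] = []; for _, properties in req_node.items(): node_maps[node_id].append((node, properties))
      (st.1.insert st.2
        ((PySem.Dict.ofList nr.2).items.foldl (fun acc it => acc ++ [(nr.1, it.2)]) []),
       st.2 + 1))
    (PySem.Dict.empty, 0)).1).values

-- ===== PORT B =====
def decompose_node_service_maps_alt (node_service_map : List (String × (List (String × List (String × Int))))) : List (List (String × (List (String × Int)))) :=
  -- rows = []; for node, req_node in …: rows.append([(node, properties) for properties in req_node.values()])
  let rows := node_service_map.foldl
    (fun acc nr => acc ++ [(PySem.Dict.ofList nr.2).values.map (fun props => (nr.1, props))]) []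
  -- total = 1; for row in rows: total *= len(row)
  let total := rows.foldl (fun t row => t * (row.length : Int)) (1 : Int)
  -- for index in range(total): combo = []; i = index;
  --   for row in reversed(rows): combo.append(row[i % len(row)]); i //= len(row)
  --   combo.reverse(); result.append(tuple(combo))
  (PySem.List.pyRange 0 total 1).foldl
    (fun result index =>
      let st := rows.reverse.foldl
        (fun (st : List (String × (List (String × Int))) × Int) row =>
          (st.1 ++ [PySem.List.pyGetD row (PySem.Int.mod st.2 (row.length : Int)) ("", [])],
           PySem.Int.floordiv st.2 (row.length : Int)))
        ([], index)
      result ++ [st.1.reverse])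
    []

-- ===== PRECONDITION & SPEC =====
def Spec_decompose_node_service_maps (node_service_map : List (String × (List (String × List (String × Int))))) (out : List (List (String × (List (String × Int))))) : Prop := out = decompose_node_service_maps_alt node_service_map
instance (node_service_map : List (String × (List (String × List (String × Int))))) (out : List (List (String × (List (String × Int))))) : Decidable (Spec_decompose_node_service_maps node_service_map out) := by unfold Spec_decompose_node_service_maps; infer_instance

-- ===== CLAIM =====
def Claim_equal_decompose_node_service_maps : Prop := ∀ (node_service_map : List (String × (List (String × List (String × Int))))), Dom_decompose_node_service_maps node_service_map → Spec_decompose_node_service_maps node_service_map (decompose_node_service_maps node_service_map)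

-- ===== LEMMAS AND PROOFS =====

-- per-node choice list shared by both sides
def pvRow (nr : String × (List (String × List (String × Int)))) : List (String × (List (String × Int))) :=
  (PySem.Dict.ofList nr.2).values.map (fun props => (nr.1, props))

theorem pvRow_eq_A_inner (nr : String × (List (String × List (String × Int)))) :
    (PySem.Dict.ofList nr.2).items.foldl (fun acc it => acc ++ [(nr.1, it.2)]) [] = pvRow nr := by
  rw [PySem.List.foldl_append_singleton_eq_map]
  simp [pvRow, PySem.Dict.values, List.map_map, Function.comp_def]

-- A's dict loop over fresh increasing keys: the values accumulate in list order
theorem pvA_values {A B : Type} (g : A → B) (m : List A)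
    (d : PySem.Dict Int B) (n : Int) (h : ∀ k ∈ d.keys, k < n) :
    ((m.foldl (fun (st : PySem.Dict Int B × Int) a => (st.1.insert st.2 (g a), st.2 + 1)) (d, n)).1).values
      = d.values ++ m.map g := by
  induction m generalizing d n with
  | nil => simp
  | cons a m ih =>
    have hc : d.contains n = false := by
      rw [PySem.Dict.contains_eq_decide_mem_keys]
      simp only [decide_eq_false_iff_not]
      intro hk
      exact absurd (h n hk) (lt_irrefl n)
    have hi := PySem.Dict.items_insert_of_not_contains (d := d) (k := n) (v := g a) hc
    simp only [List.foldl_cons, List.map_cons]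
    rw [ih _ (n + 1) (by
      intro k hk
      simp only [PySem.Dict.keys, hi, List.map_append, List.map_cons, List.map_nil] at hk
      rcases List.mem_append.mp hk with hk | hk
      · exact lt_trans (h k hk) (by omega)
      · simp only [List.mem_singleton] at hk
        omega)]
    simp only [PySem.Dict.values, hi, List.map_append, List.map_cons, List.map_nil,
      List.append_assoc, List.singleton_append]

-- ---- B side: mixed-radix decoding equals pyProduct ----

-- abstract recursion computed by B's inner (reversed-rows) loop
def pvD (rows : List (List (String × (List (String × Int))))) (i : Int) :
    List (String × (List (String × Int))) × Int :=
  match rows with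
  | [] => ([], i)
  | r :: rest =>
    let p := pvD rest i
    (p.1 ++ [PySem.List.pyGetD r (PySem.Int.mod p.2 (r.length : Int)) ("", [])],
     PySem.Int.floordiv p.2 (r.length : Int))

def pvP (rows : List (List (String × (List (String × Int))))) : Nat :=
  (rows.map List.length).prod

theorem pvF_eq (rows : List (List (String × (List (String × Int)))))
    (acc : List (String × (List (String × Int)))) (i : Int) :
    rows.reverse.foldl
      (fun (st : List (String × (List (String × Int))) × Int) row =>
        (st.1 ++ [PySem.List.pyGetD row (PySem.Int.mod st.2 (row.length : Int)) ("", [])],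
         PySem.Int.floordiv st.2 (row.length : Int)))
      (acc, i)
      = (acc ++ (pvD rows i).1, (pvD rows i).2) := by
  induction rows generalizing acc with
  | nil => simp [pvD]
  | cons r rest ih =>
    simp only [List.reverse_cons, List.foldl_append, List.foldl_cons, List.foldl_nil, ih, pvD]
    simp [List.append_assoc]

theorem pvLength_pyProduct (rows : List (List (String × (List (String × Int))))) :
    (pyProduct rows).length = pvP rows := by
  induction rows with
  | nil => simp [pyProduct, pvP]
  | cons r rest ih =>
    simp only [pyProduct, List.foldr_cons, pvP, List.map_cons, List.prod_cons]
    simp only [pyProduct] at ih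
    simp only [pvP] at ih
    simp [List.length_flatMap, ih, List.map_const']

theorem pvProd_getD (r0 : List (String × (List (String × Int))))
    (rest : List (List (String × (List (String × Int))))) (a b : Nat)
    (ha : a < r0.length) (hb : b < pvP rest) :
    (pyProduct (r0 :: rest)).getD (a * pvP rest + b) []
      = r0.getD a ("", []) :: (pyProduct rest).getD b [] := by
  induction r0 generalizing a with
  | nil => simp at ha
  | cons x r0' ih =>
    have hp : (pyProduct rest).length = pvP rest := pvLength_pyProduct rest
    have hmaplen : ((pyProduct rest).map (fun t => x :: t)).length = pvP rest := by
      simp [hp]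
    rw [show pyProduct ((x :: r0') :: rest)
        = ((pyProduct rest).map (fun t => x :: t)) ++ pyProduct (r0' :: rest) from by
      simp [pyProduct]]
    cases a with
    | zero =>
      rw [Nat.zero_mul, Nat.zero_add, List.getD_append _ _ _ _ (by omega),
        List.getD_eq_getElem _ _ (by omega), List.getElem_map, List.getD_cons_zero,
        List.getD_eq_getElem _ _ (by omega)]
    | succ a' =>
      have hidx : (a' + 1) * pvP rest + b
          = ((pyProduct rest).map (fun t => x :: t)).length + (a' * pvP rest + b) := by
        rw [hmaplen]; ring
      rw [hidx, List.getD_append_right _ _ _ _ (by omega), Nat.add_sub_cancel_left,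
        ih a' (by simpa using ha), List.getD_cons_succ]

-- main mixed-radix invariant
theorem pvMain (rows : List (List (String × (List (String × Int))))) (q r : Nat)
    (hr : r < pvP rows) :
    pvD rows ((q * pvP rows + r : Nat) : Int)
      = (((pyProduct rows).getD r []).reverse, (q : Int)) := by
  induction rows generalizing q r with
  | nil =>
    have : r = 0 := by simpa [pvP] using hr
    subst this
    simp [pvD, pvP, pyProduct]
  | cons r0 rest ih =>
    have hP : pvP (r0 :: rest) = r0.length * pvP rest := by
      simp [pvP]
    have hn : 0 < r0.length := by
      rcases Nat.eq_zero_or_pos r0.length with h | h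
      · rw [hP, h] at hr; omega
      · exact h
    have hPp : 0 < pvP rest := by
      rcases Nat.eq_zero_or_pos (pvP rest) with h | h
      · rw [hP, h] at hr; omega
      · exact h
    have ha : r / pvP rest < r0.length := by
      rw [Nat.div_lt_iff_lt_mul hPp]
      rw [hP] at hr
      calc r < r0.length * pvP rest := hr
        _ = r0.length * pvP rest := rfl
    have hb : r % pvP rest < pvP rest := Nat.mod_lt _ hPp
    have hr2 : r = pvP rest * (r / pvP rest) + r % pvP rest := (Nat.div_add_mod r (pvP rest)).symm
    have key : q * pvP (r0 :: rest) + r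
        = (q * r0.length + r / pvP rest) * pvP rest + r % pvP rest := by
      rw [hP]
      calc q * (r0.length * pvP rest) + r
          = q * (r0.length * pvP rest) + (pvP rest * (r / pvP rest) + r % pvP rest) := by rw [← hr2]
        _ = (q * r0.length + r / pvP rest) * pvP rest + r % pvP rest := by ring
    rw [key]
    simp only [pvD]
    rw [ih (q * r0.length + r / pvP rest) (r % pvP rest) hb]
    simp only [PySem.Int.mod_natCast, PySem.Int.floordiv_natCast, PySem.List.pyGetD_natCast]
    have e1 : (q * r0.length + r / pvP rest) % r0.length = r / pvP rest := by
      rw [Nat.add_comm, Nat.add_mul_mod_self_right, Nat.mod_eq_of_lt ha]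
    have e2 : (q * r0.length + r / pvP rest) / r0.length = q := by
      rw [Nat.add_comm, Nat.add_mul_div_right _ _ hn, Nat.div_eq_of_lt ha, Nat.zero_add]
    rw [e1, e2]
    have hprod := pvProd_getD r0 rest (r / pvP rest) (r % pvP rest) ha hb
    rw [show (r / pvP rest) * pvP rest + r % pvP rest = r from by
      rw [Nat.mul_comm]; exact Nat.div_add_mod r (pvP rest)] at hprod
    rw [hprod]
    simp

-- total = product of the row lengths
theorem pvTotal (rows : List (List (String × (List (String × Int))))) (c : Int) :
    rows.foldl (fun t row => t * (row.length : Int)) c = c * (pvP rows : Nat) := by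
  induction rows generalizing c with
  | nil => simp [pvP]
  | cons r rest ih =>
    simp only [List.foldl_cons, ih, pvP, List.map_cons, List.prod_cons]
    push_cast
    ring

-- B's loop equals the product of the per-node rows
theorem pvB_eq (rows : List (List (String × (List (String × Int))))) :
    (PySem.List.pyRange 0 (rows.foldl (fun t row => t * (row.length : Int)) 1) 1).foldl
      (fun result index =>
        result ++ [((rows.reverse.foldl
          (fun (st : List (String × (List (String × Int))) × Int) row =>
            (st.1 ++ [PySem.List.pyGetD row (PySem.Int.mod st.2 (row.length : Int)) ("", [])],
             PySem.Int.floordiv st.2 (row.length : Int)))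
          ([], index)).1).reverse])
      []
      = pyProduct rows := by
  rw [pvTotal, one_mul, PySem.List.foldl_append_singleton_eq_map, PySem.List.pyRange_zero_nat]
  simp only [List.map_map, Function.comp_def, pvF_eq, List.nil_append, List.nil_append]
  apply List.ext_getElem
  · simp [pvLength_pyProduct]
  · intro k h1 h2
    simp only [List.getElem_map, List.getElem_range]
    have hk : k < pvP rows := by simpa [pvLength_pyProduct] using h2
    have := pvMain rows 0 k hk
    rw [Nat.zero_mul, Nat.zero_add] at this
    rw [this]
    simp only [List.reverse_reverse]
    rw [List.getD_eq_getElem _ _ (by simpa [pvLength_pyProduct] using hk)]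

theorem pvAlt_eq (m : List (String × (List (String × List (String × Int))))) :
    decompose_node_service_maps_alt m = pyProduct (m.map pvRow) := by
  unfold decompose_node_service_maps_alt
  have hrows : (m.foldl (fun acc nr =>
      acc ++ [(PySem.Dict.ofList nr.2).values.map (fun props => (nr.1, props))]) [])
      = m.map pvRow := by
    rw [PySem.List.foldl_append_singleton_eq_map]
    simp [pvRow]
  rw [hrows]
  exact pvB_eq (m.map pvRow)

theorem decompose_node_service_maps_spec : Claim_equal_decompose_node_service_maps := by
  intro m _
  show decompose_node_service_maps m = decompose_node_service_maps_alt m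
  rw [pvAlt_eq]
  unfold decompose_node_service_maps
  rw [pvA_values
    (fun nr => (PySem.Dict.ofList nr.2).items.foldl (fun acc it => acc ++ [(nr.1, it.2)]) [])
    m PySem.Dict.empty 0 (by
      intro k hk
      simp only [PySem.Dict.keys, PySem.Dict.empty, List.map_nil] at hk
      exact absurd hk (List.not_mem_nil))]
  simp only [PySem.Dict.empty, PySem.Dict.values, List.map_nil, List.nil_append]
  simp only [pvRow_eq_A_inner]
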